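-- pv_equiv track=rewrite | github.com/HackXIt/REIL-hex-game | src/reil_hex_game/submission/rule_based_agent_4.py | favor_bridges
-- ===== SOURCE A (Python) =====
-- def favor_bridges(board, moves, player):
--     size = len(board)
--     own_stones = [(i, j) for i in range(size) for j in range(size) if board[i][j] == player]
--     best_move = None
--
--     for move in moves:
--         mx, my = move
--         for (sx, sy) in own_stones:
--             dx = mx - sx
--             dy = my - sy
--             distance = abs(dx) + abs(dy)
--             if distance in (2, 3):  # potential bridge
--                 # Respect connection direction: vertical for White (player 1), horizontal for Black (player -1)
--                 if (player == 1 and abs(dx) > abs(dy)) or (player == -1 and abs(dy) > abs(dx)):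
--                     return move
--                 if best_move is None:
--                     best_move = move
--     return best_move
--
--     for move in moves:
--         mx, my = move
--         for (sx, sy) in own_stones:
--             dx = mx - sx
--             dy = my - sy
--             distance = abs(dx) + abs(dy)
--             if distance in (2, 3):  # bridge-like structure
--                 if player == 1 and dx > 0:  # white moves downward
--                     return move
--                 if player == -1 and dy > 0:  # black moves right
--                     return move
--                 if best_move is None:  # fallback if no forward bridge found
--                     best_move = move
--
--     return best_move
-- ===== SOURCE B (Python) =====
-- def favor_bridges(board, moves, player):
--     size = len(board)
--     own = [(i, j) for i in range(size) for j in range(size) if board[i][j] == player]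
--
--     def bridge_dist(m, s):
--         return abs(m[0] - s[0]) + abs(m[1] - s[1]) in (2, 3)
--
--     def directed(m, s):
--         dx, dy = m[0] - s[0], m[1] - s[1]
--         return (player == 1 and abs(dx) > abs(dy)) or (player == -1 and abs(dy) > abs(dx))
--
--     # priority pass: first move with a bridge-distance stone in the player's direction
--     for move in moves:
--         if any(bridge_dist(move, s) and directed(move, s) for s in own):
--             return move
--     # fallback pass: first move with any bridge-distance stone
--     for move in moves:
--         if any(bridge_dist(move, s) for s in own):
--             return move
--     return None
-- ===== Notes on version B (the rewrite author's own statement) =====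
-- stated objective: simpler
-- what changed: Replaces A's single fused scan with a best_move accumulator and mid-loop early return by two plain priority-then-fallback passes over moves (first move with a directional bridge stone, else first move with any bridge-distance stone), with no mutable state.
import Mathlib
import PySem

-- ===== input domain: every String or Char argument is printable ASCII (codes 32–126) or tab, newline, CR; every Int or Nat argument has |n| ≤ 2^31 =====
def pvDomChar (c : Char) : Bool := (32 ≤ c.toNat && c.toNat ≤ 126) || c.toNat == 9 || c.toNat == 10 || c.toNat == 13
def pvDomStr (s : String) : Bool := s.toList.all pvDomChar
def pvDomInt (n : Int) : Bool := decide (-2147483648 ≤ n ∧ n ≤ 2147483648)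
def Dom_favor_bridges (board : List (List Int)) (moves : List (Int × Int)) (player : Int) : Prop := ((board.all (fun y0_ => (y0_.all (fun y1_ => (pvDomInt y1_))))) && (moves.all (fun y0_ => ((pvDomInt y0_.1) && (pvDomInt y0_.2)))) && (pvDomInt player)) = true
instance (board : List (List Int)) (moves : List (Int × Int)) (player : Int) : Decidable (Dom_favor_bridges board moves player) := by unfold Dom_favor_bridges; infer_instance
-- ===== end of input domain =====

-- B replaces A's fused scan (mutable best_move + mid-loop return) by two clean passes:
-- first move with a directional bridge stone, else first move with any bridge-distance stone.
-- Objective: simpler.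

-- ===== PORT A =====
-- own_stones comprehension (shared text in both Pythons): (i,j) over range(size)×range(size)
-- with board[i][j] == player; row access via pyGet? is exact on Pre_ (row long enough).
def pvOwnStones (board : List (List Int)) (player : Int) : List (Int × Int) :=
  (List.range board.length).flatMap (fun i =>
    (List.range board.length).filterMap (fun j =>
      match (PySem.List.pyGet? board (i : Int)).bind (fun row => PySem.List.pyGet? row (j : Int)) with
      | some v => if v = player then some ((i : Int), (j : Int)) else none
      | none => none))

-- inner stone loop of A: .inl = the 'return move', .inr = the updated best_move
def favorInnerA (player : Int) (mv : Int × Int) :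
    List (Int × Int) → Option (Int × Int) → Sum (Int × Int) (Option (Int × Int))
  | [], best => .inr best
  | (sx, sy) :: rest, best =>
    let dx := mv.1 - sx
    let dy := mv.2 - sy
    if |dx| + |dy| = 2 ∨ |dx| + |dy| = 3 then
      if (player = 1 ∧ |dx| > |dy|) ∨ (player = -1 ∧ |dy| > |dx|) then .inl mv
      else favorInnerA player mv rest (if best = none then some mv else best)
    else favorInnerA player mv rest best

def favorOuterA (player : Int) (own : List (Int × Int)) :
    List (Int × Int) → Option (Int × Int) → Option (Int × Int)
  | [], best => best
  | mv :: rest, best =>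
    match favorInnerA player mv own best with
    | .inl m => some m
    | .inr best' => favorOuterA player own rest best'

def favor_bridges (board : List (List Int)) (moves : List (Int × Int)) (player : Int) : Option (Int × Int) :=
  favorOuterA player (pvOwnStones board player) moves none

-- ===== PORT B =====
def pvBridgeDist (mv s : Int × Int) : Bool :=
  |mv.1 - s.1| + |mv.2 - s.2| = 2 || |mv.1 - s.1| + |mv.2 - s.2| = 3

def pvDirected (player : Int) (mv s : Int × Int) : Bool :=
  (player = 1 && |mv.1 - s.1| > |mv.2 - s.2|) || (player = -1 && |mv.2 - s.2| > |mv.1 - s.1|)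

def favor_bridges_alt (board : List (List Int)) (moves : List (Int × Int)) (player : Int) : Option (Int × Int) :=
  let own := pvOwnStones board player
  match moves.find? (fun mv => own.any (fun s => pvBridgeDist mv s && pvDirected player mv s)) with
  | some mv => some mv
  | none => moves.find? (fun mv => own.any (fun s => pvBridgeDist mv s))

-- ===== PRECONDITION & SPEC =====
-- Pre_ excludes exactly the boards with a row shorter than len(board), on which
-- Python A raises IndexError at board[i][j] (and Python B raises there too).
def Pre_favor_bridges (board : List (List Int)) (moves : List (Int × Int)) (player : Int) : Prop :=
  ∀ row ∈ board, board.length ≤ row.length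
instance (board : List (List Int)) (moves : List (Int × Int)) (player : Int) : Decidable (Pre_favor_bridges board moves player) := by unfold Pre_favor_bridges; infer_instance
def pvWitness_favor_bridges : List (List Int) × (List (Int × Int)) × Int := ([[1]], [((0 : Int), (0 : Int))], 1)
def Spec_favor_bridges (board : List (List Int)) (moves : List (Int × Int)) (player : Int) (out : Option (Int × Int)) : Prop := out = favor_bridges_alt board moves player
instance (board : List (List Int)) (moves : List (Int × Int)) (player : Int) (out : Option (Int × Int)) : Decidable (Spec_favor_bridges board moves player out) := by unfold Spec_favor_bridges; infer_instance

-- ===== CLAIM (what is proved, stated in full; the proofs are below) =====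
def Claim_equal_favor_bridges : Prop := ∀ (board : List (List Int)) (moves : List (Int × Int)) (player : Int), Dom_favor_bridges board moves player → Pre_favor_bridges board moves player → Spec_favor_bridges board moves player (favor_bridges board moves player)

-- ===== LEMMAS AND PROOFS =====

theorem favorInnerA_eq (player : Int) (mv : Int × Int) (own : List (Int × Int))
    (best : Option (Int × Int)) :
    favorInnerA player mv own best =
      if own.any (fun s => pvBridgeDist mv s && pvDirected player mv s) then .inl mv
      else .inr (if best = none ∧ own.any (fun s => pvBridgeDist mv s) then some mv else best) := by
  induction own generalizing best with
  | nil => simp [favorInnerA]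
  | cons s rest ih =>
    obtain ⟨sx, sy⟩ := s
    simp only [favorInnerA, List.any_cons, pvBridgeDist, pvDirected]
    by_cases hd : |mv.1 - sx| + |mv.2 - sy| = 2 ∨ |mv.1 - sx| + |mv.2 - sy| = 3
    · by_cases hdir : (player = 1 ∧ |mv.1 - sx| > |mv.2 - sy|) ∨ (player = -1 ∧ |mv.2 - sy| > |mv.1 - sx|)
      · simp [hd, hdir]
      · rw [if_pos hd, if_neg hdir, ih]
        have hdirb : ((decide (player = 1) && decide (|mv.1 - sx| > |mv.2 - sy|)) ||
            (decide (player = -1) && decide (|mv.2 - sy| > |mv.1 - sx|))) = false := by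
          by_contra hB
          rcases Bool.or_eq_true_iff.mp (Bool.of_not_eq_false hB) with h | h <;>
            simp only [Bool.and_eq_true, decide_eq_true_eq] at h
          · exact hdir (Or.inl h)
          · exact hdir (Or.inr h)
        simp only [hdirb, Bool.and_false, Bool.false_or]
        by_cases hb : best = none <;> rcases hd with hd | hd <;>
          simp [pvBridgeDist, pvDirected, hb, hd]
    · rw [if_neg hd, ih]
      have e2 : decide (|mv.1 - sx| + |mv.2 - sy| = 2) = false :=
        decide_eq_false (fun h => hd (Or.inl h))
      have e3 : decide (|mv.1 - sx| + |mv.2 - sy| = 3) = false :=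
        decide_eq_false (fun h => hd (Or.inr h))
      simp only [e2, e3]
      simp only [Bool.or_self, Bool.false_and, Bool.false_or, pvBridgeDist, pvDirected]
      rfl

theorem favorOuterA_eq (player : Int) (own : List (Int × Int)) (moves : List (Int × Int))
    (best : Option (Int × Int)) :
    favorOuterA player own moves best =
      match moves.find? (fun mv => own.any (fun s => pvBridgeDist mv s && pvDirected player mv s)) with
      | some mv => some mv
      | none =>
        match best with
        | some b => some b
        | none => moves.find? (fun mv => own.any (fun s => pvBridgeDist mv s)) := by
  induction moves generalizing best with
  | nil => cases best <;> simp [favorOuterA]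
  | cons mv rest ih =>
    simp only [favorOuterA, favorInnerA_eq, List.find?_cons]
    by_cases hdir : own.any (fun s => pvBridgeDist mv s && pvDirected player mv s) = true
    · simp [hdir]
    · rw [if_neg hdir]
      have hdir' : (own.any fun s => pvBridgeDist mv s && pvDirected player mv s) = false :=
        Bool.of_not_eq_true hdir
      simp only [hdir']
      rw [ih]
      cases hfind : rest.find? (fun mv => own.any (fun s => pvBridgeDist mv s && pvDirected player mv s)) with
      | some m => simp
      | none =>
        simp only
        cases best with
        | some b => simp
        | none =>
          by_cases hnear : own.any (fun s => pvBridgeDist mv s) = true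
          · simp [hnear]
          · have h2 := Bool.of_not_eq_true hnear
            simp [h2]

-- ===== VERDICT (by name: the statement is the Claim_ definition above) =====
theorem favor_bridges_spec : Claim_equal_favor_bridges := by
  intro board moves player _ _
  unfold Spec_favor_bridges favor_bridges favor_bridges_alt
  rw [favorOuterA_eq]
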